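-- pv_equiv track=rewrite | github.com/jimtsa80/python-scripts-automation | baseball_reshaper/inning_creator.py | number_groups
-- ===== SOURCE A (Python) =====
-- def number_groups(lst):
--     numbered_list = []
--     count = 1
--
--     for i in range(len(lst)):
--         if i == 0 or lst[i] != lst[i - 1]:
--             count = 1
--         numbered_list.append(str(count))
--         count += 1
--
--     return numbered_list
-- ===== SOURCE B (Python) =====
-- def number_groups(lst):
--     # Two-pointer / group-first: find each maximal run of equal values,
--     # then emit "1".."k" for a run of length k.
--     result = []
--     n = len(lst)
--     i = 0
--     while i < n:
--         x = lst[i]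
--         j = i + 1
--         while j < n and lst[j] == x:
--             j += 1
--         result.extend(str(c) for c in range(1, j - i + 1))
--         i = j
--     return result
-- ===== Notes on version B (the rewrite author's own statement) =====
-- stated objective: alternative
-- what changed: A numbers each position in one flat pass by comparing lst[i] with lst[i-1] and resetting a counter; B first finds each maximal run with an inner two-pointer scan and then emits str(1)..str(k) for the whole run at once.
import Mathlib
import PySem

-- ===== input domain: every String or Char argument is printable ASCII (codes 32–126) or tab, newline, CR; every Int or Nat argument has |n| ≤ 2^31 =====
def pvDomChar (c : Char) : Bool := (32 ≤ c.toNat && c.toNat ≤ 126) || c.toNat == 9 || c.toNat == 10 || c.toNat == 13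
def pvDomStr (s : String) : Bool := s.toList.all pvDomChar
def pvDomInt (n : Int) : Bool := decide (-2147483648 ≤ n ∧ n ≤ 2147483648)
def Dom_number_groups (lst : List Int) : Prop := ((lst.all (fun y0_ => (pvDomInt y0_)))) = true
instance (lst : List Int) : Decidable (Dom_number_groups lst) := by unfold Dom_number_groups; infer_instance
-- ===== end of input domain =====

-- B replaces A's flat prev-comparison pass by a two-pointer group-first scan (same asymptotic cost; alternative structure).


-- ===== PORT A =====
-- one step of A's for-loop body (state = (numbered_list, count), i the loop index)
def pvStepA (lst : List Int) (st : List String × Int) (i : Int) : List String × Int :=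
  let count := if i = 0 ∨ PySem.List.pyGetD lst i 0 ≠ PySem.List.pyGetD lst (i - 1) 0 then 1 else st.2
  (st.1 ++ [PySem.Int.toStr count], count + 1)

def number_groups (lst : List Int) : List String :=
  ((PySem.List.pyRange 0 (PySem.List.len lst) 1).foldl (pvStepA lst) ([], 1)).1

-- ===== PORT B =====
-- inner while loop of B: advance j while lst[j] == x
def pvScanB (lst : List Int) (x : Int) (j : Nat) : Nat :=
  if j < lst.length ∧ PySem.List.pyGetD lst (j : Int) 0 = x then pvScanB lst x (j + 1) else j
termination_by lst.length - j
decreasing_by omega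

theorem pvScanB_ge (lst : List Int) (x : Int) (j : Nat) : j ≤ pvScanB lst x j := by
  induction j using pvScanB.induct lst x with
  | case1 j h ih => rw [pvScanB, if_pos h]; omega
  | case2 j h => rw [pvScanB, if_neg h]

-- outer while loop of B, from position i
def pvOuterB (lst : List Int) (i : Nat) : List String :=
  if _h : i < lst.length then
    let x := PySem.List.pyGetD lst (i : Int) 0
    let j := pvScanB lst x (i + 1)
    ((PySem.List.pyRange 1 ((j : Int) - (i : Int) + 1) 1).map PySem.Int.toStr) ++ pvOuterB lst j
  else []
termination_by lst.length - i
decreasing_by have := pvScanB_ge lst (PySem.List.pyGetD lst (i : Int) 0) (i + 1); omega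

def number_groups_alt (lst : List Int) : List String := pvOuterB lst 0

-- ===== PRECONDITION & SPEC =====
def Spec_number_groups (lst : List Int) (out : List String) : Prop := out = number_groups_alt lst
instance (lst : List Int) (out : List String) : Decidable (Spec_number_groups lst out) := by unfold Spec_number_groups; infer_instance

-- ===== CLAIM (what is proved, stated in full; the proofs are below) =====
def Claim_equal_number_groups : Prop := ∀ (lst : List Int), Dom_number_groups lst → Spec_number_groups lst (number_groups lst)

-- ===== LEMMAS AND PROOFS =====
-- common intermediate spec: number within runs, given previous value x and current counter c
def pvSpecGo (x c : Int) : List Int → List String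
  | [] => []
  | y :: ys => if y = x then PySem.Int.toStr c :: pvSpecGo x (c + 1) ys
               else PySem.Int.toStr 1 :: pvSpecGo y 2 ys

def pvSpec : List Int → List String
  | [] => []
  | y :: ys => PySem.Int.toStr 1 :: pvSpecGo y 2 ys

-- ----- A = pvSpec -----
theorem pvA_go (lst : List Int) (j : Nat) (hj1 : 1 ≤ j) (hj2 : j ≤ lst.length)
    (acc : List String) (c : Int) :
    ((PySem.List.pyRange (j : Int) (lst.length : Int) 1).foldl (pvStepA lst) (acc, c)).1
      = acc ++ pvSpecGo (lst.getD (j - 1) 0) c (lst.drop j) := by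
  obtain ⟨k, hk⟩ := Nat.exists_eq_add_of_le hj2
  induction k generalizing j acc c with
  | zero =>
    rw [PySem.List.pyRange_one_eq_nil (by omega), List.drop_of_length_le (by omega)]
    simp [pvSpecGo]
  | succ k ih =>
    have hjlt : j < lst.length := by omega
    rw [PySem.List.pyRange_one_cons (by exact_mod_cast hjlt), List.foldl_cons]
    have hcast : ((j : Int)) - 1 = ((j - 1 : Nat) : Int) := by omega
    have hj0 : ¬ ((j : Int) = 0) := by omega
    have hdrop : lst.drop j = lst.getD j 0 :: lst.drop (j + 1) := by
      rw [List.drop_eq_getElem_cons hjlt, List.getD_eq_getElem _ _ hjlt]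
    have hsucc : ((j : Int)) + 1 = ((j + 1 : Nat) : Int) := by omega
    by_cases heq : lst.getD j 0 = lst.getD (j - 1) 0
    · have heq' : lst[j]?.getD 0 = lst[(j - 1 : Nat)]?.getD 0 := by simpa [List.getD] using heq
      have hcond : ¬ ((j : Int) = 0 ∨
          PySem.List.pyGetD lst (j : Int) 0 ≠ PySem.List.pyGetD lst ((j : Int) - 1) 0) := by
        rw [hcast]
        simp only [PySem.List.pyGetD_natCast, List.getD, not_or, not_not, ne_eq]
        exact ⟨hj0, heq'⟩
      simp only [pvStepA, if_neg hcond]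
      rw [hsucc, ih (j + 1) (by omega) (by omega) _ _ (by omega), hdrop]
      simp [pvSpecGo, heq']
    · have heq' : lst[j]?.getD 0 ≠ lst[(j - 1 : Nat)]?.getD 0 := by simpa [List.getD] using heq
      have hcond : ((j : Int) = 0 ∨
          PySem.List.pyGetD lst (j : Int) 0 ≠ PySem.List.pyGetD lst ((j : Int) - 1) 0) :=
        Or.inr (by rw [hcast]; simpa [PySem.List.pyGetD_natCast, List.getD] using heq')
      simp only [pvStepA, if_pos hcond]
      rw [hsucc, ih (j + 1) (by omega) (by omega) _ _ (by omega), hdrop]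
      simp [pvSpecGo, heq']

theorem pvA_eq_spec (lst : List Int) : number_groups lst = pvSpec lst := by
  cases lst with
  | nil => rfl
  | cons y ys =>
    unfold number_groups
    rw [PySem.List.len_eq,
        PySem.List.pyRange_one_cons (by exact_mod_cast Nat.succ_pos ys.length), List.foldl_cons]
    have hcond : ((0 : Int) = 0 ∨
        PySem.List.pyGetD (y :: ys) (0 : Int) 0 ≠ PySem.List.pyGetD (y :: ys) ((0 : Int) - 1) 0) :=
      Or.inl rfl
    simp only [pvStepA, if_pos hcond]
    have h1 : ((0 : Int) + 1) = ((1 : Nat) : Int) := by omega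
    rw [h1, pvA_go (y :: ys) 1 le_rfl (by simp)]
    simp [pvSpec]

-- ----- B = pvSpec -----
theorem pvB_run (lst : List Int) (x : Int) (j : Nat) (c : Int) :
    pvSpecGo x c (lst.drop j)
      = (PySem.List.pyRange c (c + ((pvScanB lst x j : Int) - (j : Int))) 1).map PySem.Int.toStr
        ++ pvSpec (lst.drop (pvScanB lst x j)) := by
  induction j using pvScanB.induct lst x generalizing c with
  | case1 j h ih =>
    obtain ⟨hjlt, hx⟩ := h
    rw [pvScanB, if_pos ⟨hjlt, hx⟩]
    have hge := pvScanB_ge lst x (j + 1)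
    have hdrop : lst.drop j = lst.getD j 0 :: lst.drop (j + 1) := by
      rw [List.drop_eq_getElem_cons hjlt, List.getD_eq_getElem _ _ hjlt]
    have hxval : lst.getD j 0 = x := by simpa [PySem.List.pyGetD_natCast] using hx
    rw [hdrop, hxval, pvSpecGo, if_pos rfl]
    rw [PySem.List.pyRange_one_cons (by
      have : (j : Int) < (pvScanB lst x (j + 1) : Int) := by exact_mod_cast by omega
      omega)]
    have harith : c + ((pvScanB lst x (j + 1) : Int) - (j : Int))
        = (c + 1) + ((pvScanB lst x (j + 1) : Int) - ((j + 1 : Nat) : Int)) := by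
      push_cast; ring
    rw [harith, List.map_cons, ih, List.cons_append]
  | case2 j h =>
    rw [pvScanB, if_neg h]
    have hz : c + ((j : Int) - (j : Int)) = c := by ring
    rw [hz, PySem.List.pyRange_one_eq_nil le_rfl, List.map_nil, List.nil_append]
    by_cases hjlt : j < lst.length
    · have hx : lst.getD j 0 ≠ x := by
        intro hc
        exact h ⟨hjlt, by simpa [PySem.List.pyGetD_natCast] using hc⟩
      rw [List.drop_eq_getElem_cons hjlt, ← List.getD_eq_getElem lst 0 hjlt]
      rw [pvSpecGo, if_neg hx, pvSpec]
    · rw [List.drop_of_length_le (by omega)]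
      rfl

theorem pvB_go (lst : List Int) (i : Nat) : pvOuterB lst i = pvSpec (lst.drop i) := by
  induction i using pvOuterB.induct lst with
  | case1 i h x j ih =>
    have hj : j = pvScanB lst x (i + 1) := rfl
    have hge : i + 1 ≤ j := pvScanB_ge lst x (i + 1)
    have hxval : x = lst.getD i 0 := by simp [x, PySem.List.pyGetD_natCast]
    have hdrop : lst.drop i = lst.getD i 0 :: lst.drop (i + 1) := by
      rw [List.drop_eq_getElem_cons h, List.getD_eq_getElem _ _ h]
    have hcons : PySem.List.pyRange 1 ((j : Int) - (i : Int) + 1) 1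
        = 1 :: PySem.List.pyRange (1 + 1) ((j : Int) - (i : Int) + 1) 1 :=
      PySem.List.pyRange_one_cons (by
        have : ((i : Int)) + 1 ≤ (j : Int) := by exact_mod_cast hge
        omega)
    have h2 : (1 : Int) + 1 = 2 := by norm_num
    have harith2 : (j : Int) - (i : Int) + 1 = 2 + ((j : Int) - ((i + 1 : Nat) : Int)) := by
      push_cast; ring
    rw [pvOuterB, dif_pos h]
    show (PySem.List.pyRange 1 ((j : Int) - (i : Int) + 1) 1).map PySem.Int.toStr ++ pvOuterB lst j
        = pvSpec (lst.drop i)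
    rw [hcons, h2, List.map_cons, List.cons_append, ih, hdrop]
    simp only [pvSpec]
    rw [← hxval, pvB_run lst x (i + 1) 2, ← hj, harith2]
    simp only [pvSpec.eq_def]
  | case2 i h =>
    rw [pvOuterB, dif_neg h, List.drop_of_length_le (by omega)]
    rfl

theorem pvB_eq_spec (lst : List Int) : number_groups_alt lst = pvSpec lst := by
  simpa [number_groups_alt] using pvB_go lst 0

-- ===== VERDICT (by name: the statement is the Claim_ definition above) =====
theorem number_groups_spec : Claim_equal_number_groups := by
  intro lst _
  unfold Spec_number_groups
  rw [pvA_eq_spec, pvB_eq_spec]
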